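-- pv_equiv track=rewrite | github.com/almohsinkhan/local-ai-agent | app/agent/tools/task_tools.py | _resolve_task_identifier
-- ===== SOURCE A (Python) =====
-- from typing import Annotated, Any
--
-- def _resolve_task_identifier(identifier: str, open_tasks: list[dict[str, Any]]) -> tuple[str | None, str | None]:
--     """Return (task_id, ambiguity_marker)."""
--     key = identifier.strip().lower()
--     if not key:
--         return None, ""
--
--     for task in open_tasks:
--         if str(task.get("id", "")).strip().lower() == key:
--             return str(task.get("id", "")), None
--
--     exact_title_matches = [
--         task for task in open_tasks if str(task.get("title", "")).strip().lower() == key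
--     ]
--     if len(exact_title_matches) == 1:
--         return str(exact_title_matches[0].get("id", "")), None
--     if len(exact_title_matches) > 1:
--         return None, identifier
--
--     contains_matches = [
--         task for task in open_tasks if key in str(task.get("title", "")).strip().lower()
--     ]
--     if len(contains_matches) == 1:
--         return str(contains_matches[0].get("id", "")), None
--     if len(contains_matches) > 1:
--         return None, identifier
--
--     return None, None
-- ===== SOURCE B (Python) =====
-- from typing import Any
--
-- def _resolve_task_identifier(identifier: str, open_tasks: list[dict[str, Any]]) -> tuple[str | None, str | None]:
--     """Return (task_id, ambiguity_marker) — one pass classifying each task."""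
--     key = identifier.strip().lower()
--     if not key:
--         return None, ""
--
--     id_match = None
--     exact_ids = []
--     contains_ids = []
--     for task in open_tasks:
--         tid = str(task.get("id", ""))
--         title = str(task.get("title", "")).strip().lower()
--         if id_match is None and tid.strip().lower() == key:
--             id_match = tid
--         if title == key:
--             exact_ids.append(tid)
--         if key in title:
--             contains_ids.append(tid)
--
--     if id_match is not None:
--         return id_match, None
--     if len(exact_ids) == 1:
--         return exact_ids[0], None
--     if exact_ids:
--         return None, identifier
--     if len(contains_ids) == 1:
--         return contains_ids[0], None
--     if contains_ids:
--         return None, identifier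
--     return None, None
-- ===== Notes on version B (the rewrite author's own statement) =====
-- stated objective: alternative
-- what changed: Replaces A's three separate passes over open_tasks (id scan, exact-title filter, contains filter) by a single loop that classifies each task once into (first id match, exact-title ids, substring ids), then applies the same priority to the accumulated results.
import Mathlib
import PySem

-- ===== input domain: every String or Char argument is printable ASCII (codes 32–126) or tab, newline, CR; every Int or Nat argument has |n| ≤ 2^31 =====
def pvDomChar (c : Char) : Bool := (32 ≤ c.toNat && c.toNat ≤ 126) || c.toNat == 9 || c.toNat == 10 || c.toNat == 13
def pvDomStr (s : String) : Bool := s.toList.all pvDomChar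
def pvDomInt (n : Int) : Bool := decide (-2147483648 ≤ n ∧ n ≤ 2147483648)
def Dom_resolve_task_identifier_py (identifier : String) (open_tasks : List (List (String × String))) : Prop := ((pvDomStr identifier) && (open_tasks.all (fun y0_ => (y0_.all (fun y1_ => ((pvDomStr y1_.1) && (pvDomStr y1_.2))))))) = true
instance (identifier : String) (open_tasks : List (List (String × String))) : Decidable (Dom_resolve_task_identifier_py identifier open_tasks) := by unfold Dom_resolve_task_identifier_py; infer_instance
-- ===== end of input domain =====

-- B replaces A's three passes over open_tasks by one classifying loop (alternative decomposition, same cost).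
-- Equivalence of RETURN values; neither program mutates its arguments.

-- ===== PORT A =====
-- str(task.get(k, "")) — values are strings, so str() is the identity
def pvField (task : List (String × String)) (k : String) : String :=
  PySem.Dict.getD (PySem.Dict.mk task) k ""

-- s.strip().lower()
def pvNorm (s : String) : String := PySem.Str.lower (PySem.Str.strip s)

def resolve_task_identifier_py (identifier : String) (open_tasks : List (List (String × String))) : Option String × Option String :=
  let key := pvNorm identifier
  if key = "" then (none, some "") else
  match open_tasks.find? (fun task => pvNorm (pvField task "id") == key) with
  | some task => (some (pvField task "id"), none)
  | none =>
    let exact_title_matches := open_tasks.filter (fun task => pvNorm (pvField task "title") == key)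
    if exact_title_matches.length = 1 then (some (pvField exact_title_matches.headI "id"), none)
    else if exact_title_matches.length > 1 then (none, some identifier)
    else
      let contains_matches := open_tasks.filter (fun task => PySem.Str.isIn key (pvNorm (pvField task "title")))
      if contains_matches.length = 1 then (some (pvField contains_matches.headI "id"), none)
      else if contains_matches.length > 1 then (none, some identifier)
      else (none, none)

-- ===== PORT B =====
-- one loop step: (first id match so far, exact-title ids so far, substring ids so far)
def pvStep (key : String) (acc : Option String × List String × List String)
    (task : List (String × String)) : Option String × List String × List String :=
  let tid := pvField task "id"
  let title := pvNorm (pvField task "title")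
  let idm := match acc.1 with
    | some x => some x
    | none => if pvNorm tid == key then some tid else none
  let ex := if title == key then acc.2.1 ++ [tid] else acc.2.1
  let co := if PySem.Str.isIn key title then acc.2.2 ++ [tid] else acc.2.2
  (idm, ex, co)

def resolve_task_identifier_py_alt (identifier : String) (open_tasks : List (List (String × String))) : Option String × Option String :=
  let key := pvNorm identifier
  if key = "" then (none, some "") else
  let acc := open_tasks.foldl (pvStep key) (none, [], [])
  match acc.1 with
  | some x => (some x, none)
  | none =>
    if acc.2.1.length = 1 then (some acc.2.1.headI, none)
    else if acc.2.1.length > 1 then (none, some identifier)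
    else if acc.2.2.length = 1 then (some acc.2.2.headI, none)
    else if acc.2.2.length > 1 then (none, some identifier)
    else (none, none)

-- ===== PRECONDITION & SPEC =====
def Spec_resolve_task_identifier_py (identifier : String) (open_tasks : List (List (String × String))) (out : Option String × Option String) : Prop := out = resolve_task_identifier_py_alt identifier open_tasks
instance (identifier : String) (open_tasks : List (List (String × String))) (out : Option String × Option String) : Decidable (Spec_resolve_task_identifier_py identifier open_tasks out) := by unfold Spec_resolve_task_identifier_py; infer_instance

-- ===== CLAIM (what is proved, stated in full; the proofs are below) =====
def Claim_equal_resolve_task_identifier_py : Prop := ∀ (identifier : String) (open_tasks : List (List (String × String))), Dom_resolve_task_identifier_py identifier open_tasks → Spec_resolve_task_identifier_py identifier open_tasks (resolve_task_identifier_py identifier open_tasks)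

-- ===== LEMMAS AND PROOFS =====

-- the fold computes (first id match, ids of exact-title matches, ids of substring matches)
theorem pvFold_spec (key : String) (ot : List (List (String × String)))
    (i : Option String) (e c : List String) :
    ot.foldl (pvStep key) (i, e, c) =
      ((match i with
        | some x => some x
        | none => (ot.find? (fun task => pvNorm (pvField task "id") == key)).map
            (fun task => pvField task "id")),
       e ++ (ot.filter (fun task => pvNorm (pvField task "title") == key)).map
            (fun task => pvField task "id"),
       c ++ (ot.filter (fun task => PySem.Str.isIn key (pvNorm (pvField task "title")))).map
            (fun task => pvField task "id")) := by
  induction ot generalizing i e c with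
  | nil => cases i <;> simp
  | cons t ts ih =>
    simp only [List.foldl_cons, pvStep]
    rw [ih]
    cases hid : (pvNorm (pvField t "id") == key) <;>
      cases hti : (pvNorm (pvField t "title") == key) <;>
      cases hco : (PySem.Str.isIn key (pvNorm (pvField t "title"))) <;>
      cases i <;>
      simp_all

theorem resolve_task_identifier_py_eq (identifier : String)
    (open_tasks : List (List (String × String))) :
    resolve_task_identifier_py identifier open_tasks
      = resolve_task_identifier_py_alt identifier open_tasks := by
  unfold resolve_task_identifier_py resolve_task_identifier_py_alt
  by_cases hk : pvNorm identifier = ""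
  · simp [hk]
  · rw [if_neg hk, if_neg hk, pvFold_spec]
    cases hf : List.find? (fun task => pvNorm (pvField task "id") == pvNorm identifier) open_tasks with
    | some t => simp
    | none =>
      simp only [Option.map_none, List.nil_append, List.length_map]
      cases hex : List.filter (fun task => pvNorm (pvField task "title") == pvNorm identifier) open_tasks with
      | cons t1 rest =>
        cases rest with
        | nil => simp
        | cons t2 r => simp
      | nil =>
        cases hcon : List.filter (fun task => PySem.Str.isIn (pvNorm identifier) (pvNorm (pvField task "title"))) open_tasks with
        | nil => simp
        | cons t1 rest =>
          cases rest with
          | nil => simp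
          | cons t2 r => simp

-- ===== VERDICT (by name: the statement is the Claim_ definition above) =====
theorem resolve_task_identifier_py_spec : Claim_equal_resolve_task_identifier_py := by
  intro identifier open_tasks _
  unfold Spec_resolve_task_identifier_py
  exact resolve_task_identifier_py_eq identifier open_tasks
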